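-- pv_equiv track=rewrite | github.com/Tomas-W/MapEditor | utilities/general.py | get_grid_max_row_col
-- ===== SOURCE A (Python) =====
-- from typing import List, Union, Tuple, Dict, Any
--
-- def get_grid_max_row_col(world_data: List[List[int]]) -> Tuple[int, int]:
--     """
--         Get the number of rows and columns that can be removed from the end of world_data.
--         First value is the number of rows, descending, that contain no -1.
--         Second value is the number of columns, descending, that contain no -1
--
--         Args:
--             world_data (List[List[int]]: Nested list containing tile indexes of the map.
--
--         Returns:
--             Tuple[int, int]: Number of rows and columns that can be safely removed.
--     """
--     rows_to_keep = len(world_data)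
--     for row in world_data[::-1]:
--         if all(index == -1 for index in row):
--             rows_to_keep -= 1
--         else:
--             break
--
--     cols_to_keep = 0
--     for row in world_data:
--         for i, col in enumerate(row):
--             if col != -1:
--                 cols_to_keep = max(cols_to_keep, i + 1)
--
--     return rows_to_keep, cols_to_keep
-- ===== SOURCE B (Python) =====
-- def get_grid_max_row_col(world_data):
--     last_nonempty_row = -1
--     max_col = 0
--     for i, row in enumerate(world_data):
--         for j, cell in enumerate(row):
--             if cell != -1:
--                 last_nonempty_row = i
--                 if j + 1 > max_col:
--                     max_col = j + 1
--     return last_nonempty_row + 1, max_col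
-- ===== Notes on version B (the rewrite author's own statement) =====
-- stated objective: simpler
-- what changed: Replaces A's two separate passes (a reverse scan with break counting trailing all--1 rows, plus a second full scan for the max column) by one fused forward double loop that tracks the last row index containing a non--1 cell and the max used column, returning (last_nonempty_row + 1, max_col).
import Mathlib
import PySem

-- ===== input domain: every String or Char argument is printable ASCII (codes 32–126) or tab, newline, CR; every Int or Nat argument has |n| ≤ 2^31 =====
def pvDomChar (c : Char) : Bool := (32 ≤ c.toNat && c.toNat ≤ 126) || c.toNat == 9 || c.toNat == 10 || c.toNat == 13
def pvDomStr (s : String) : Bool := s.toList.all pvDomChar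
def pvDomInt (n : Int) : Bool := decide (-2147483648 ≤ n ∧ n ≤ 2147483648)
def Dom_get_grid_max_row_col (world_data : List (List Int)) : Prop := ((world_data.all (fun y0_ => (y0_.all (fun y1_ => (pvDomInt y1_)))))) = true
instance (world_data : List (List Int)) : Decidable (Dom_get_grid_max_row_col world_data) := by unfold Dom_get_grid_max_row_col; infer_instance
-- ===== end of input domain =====

-- B fuses A's two passes (reverse scan with break for trailing all-(-1) rows, plus a
-- second full scan for the max used column) into ONE forward double loop tracking the
-- last non-empty row index and the max column; same cost, simpler decomposition.

-- ===== PORT A =====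
-- reverse-scan loop with break: 'for row in world_data[::-1]: if all(== -1): rows -= 1 else: break'
def pvARowsLoop (rows : List (List Int)) (acc : Int) : Int :=
  match rows with
  | [] => acc
  | row :: rest =>
      if row.all (fun idx => idx == -1) then pvARowsLoop rest (acc - 1) else acc

def get_grid_max_row_col (world_data : List (List Int)) : Int × Int :=
  -- world_data[::-1] is world_data.reverse (PySem.List.slice?_none_none_neg_one)
  let rows_to_keep := pvARowsLoop world_data.reverse (world_data.length : Int)
  let cols_to_keep :=
    world_data.foldl (fun acc row =>
      (PySem.List.enumerate row).foldl (fun c p =>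
        if p.2 ≠ -1 then max c (p.1 + 1) else c) acc) 0
  (rows_to_keep, cols_to_keep)

-- ===== PORT B =====
def get_grid_max_row_col_alt (world_data : List (List Int)) : Int × Int :=
  let s :=
    (PySem.List.enumerate world_data).foldl (fun st p =>
      (PySem.List.enumerate p.2).foldl (fun st q =>
        if q.2 ≠ -1 then
          (p.1, if q.1 + 1 > st.2 then q.1 + 1 else st.2)
        else st) st) ((-1 : Int), (0 : Int))
  (s.1 + 1, s.2)

-- ===== PRECONDITION & SPEC =====
def Spec_get_grid_max_row_col (world_data : List (List Int)) (out : Int × Int) : Prop := out = get_grid_max_row_col_alt world_data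
instance (world_data : List (List Int)) (out : Int × Int) : Decidable (Spec_get_grid_max_row_col world_data out) := by unfold Spec_get_grid_max_row_col; infer_instance

-- ===== CLAIM (what is proved, stated in full; the proofs are below) =====
def Claim_equal_get_grid_max_row_col : Prop := ∀ (world_data : List (List Int)), Dom_get_grid_max_row_col world_data → Spec_get_grid_max_row_col world_data (get_grid_max_row_col world_data)

-- ===== LEMMAS AND PROOFS =====

-- pure specs used only to relate the two ports
def pvRowEmpty (row : List Int) : Bool := row.all (fun idx => idx == -1)

-- max used column within one row, indices counted from s
def pvRowMax (row : List Int) (s : Int) : Int :=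
  match row with
  | [] => 0
  | c :: rest => if c ≠ -1 then max (s + 1) (pvRowMax rest (s + 1)) else pvRowMax rest (s + 1)

-- rows-to-keep spec: 1 + index of last non-empty row (0 if none)
def pvRowsSpec (wd : List (List Int)) : Int :=
  match wd with
  | [] => 0
  | r :: rest =>
      if pvRowsSpec rest > 0 then pvRowsSpec rest + 1
      else if pvRowEmpty r then 0 else 1

def pvColsSpec (wd : List (List Int)) : Int :=
  match wd with
  | [] => 0
  | r :: rest => max (pvRowMax r 0) (pvColsSpec rest)

theorem pvRowsSpec_nonneg (wd : List (List Int)) : 0 ≤ pvRowsSpec wd := by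
  induction wd with
  | nil => simp [pvRowsSpec]
  | cons r rest ih => simp only [pvRowsSpec]; split_ifs <;> omega

theorem pvRowMax_nonneg (row : List Int) (s : Int) (hs : -1 ≤ s) : 0 ≤ pvRowMax row s := by
  induction row generalizing s with
  | nil => simp [pvRowMax]
  | cons c rest ih =>
      simp only [pvRowMax]
      have := ih (s + 1) (by omega)
      split_ifs <;> omega

theorem pvRowsSpec_zero_iff (wd : List (List Int)) :
    pvRowsSpec wd = 0 ↔ wd.all pvRowEmpty = true := by
  induction wd with
  | nil => simp [pvRowsSpec]
  | cons r rest ih =>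
      have h0 := pvRowsSpec_nonneg rest
      simp only [pvRowsSpec, List.all_cons, Bool.and_eq_true]
      split_ifs with h1 h2
      · constructor
        · intro h; omega
        · rintro ⟨_, he⟩; have := ih.mpr he; omega
      · have he : rest.all pvRowEmpty = true := ih.mp (by omega)
        simp [h2, he]
      · simp [h2]

-- ==== A side ====

theorem pvARowsLoop_shift (ys : List (List Int)) (a b : Int) :
    pvARowsLoop ys (a + b) = pvARowsLoop ys a + b := by
  induction ys generalizing a with
  | nil => simp [pvARowsLoop]
  | cons r rest ih =>
      simp only [pvARowsLoop]
      by_cases hr : (r.all fun idx => idx == -1) = true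
      · rw [if_pos hr, if_pos hr, show a + b - 1 = (a - 1) + b by ring, ih]
      · rw [if_neg hr, if_neg hr]

theorem pvARowsLoop_append (xs ys : List (List Int)) (a : Int) :
    pvARowsLoop (xs ++ ys) a =
      if xs.all pvRowEmpty = true then pvARowsLoop ys (a - xs.length) else pvARowsLoop xs a := by
  induction xs generalizing a with
  | nil => simp
  | cons r rest ih =>
      simp only [List.cons_append, pvARowsLoop]
      by_cases hr : (r.all fun idx => idx == -1) = true
      · rw [if_pos hr, ih (a - 1)]
        by_cases h2 : rest.all pvRowEmpty = true
        · rw [if_pos h2,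
            if_pos (show (r :: rest).all pvRowEmpty = true by
              rw [List.all_cons, Bool.and_eq_true]; exact ⟨hr, h2⟩)]
          congr 1
          simp only [List.length_cons]
          push_cast; ring
        · rw [if_neg h2,
            if_neg (show ¬ (r :: rest).all pvRowEmpty = true by
              rw [List.all_cons, Bool.and_eq_true]; intro hc; exact h2 hc.2),
            if_pos hr]
      · rw [if_neg hr,
          if_neg (show ¬ (r :: rest).all pvRowEmpty = true by
            rw [List.all_cons, Bool.and_eq_true]; intro hc; exact hr hc.1),
          if_neg hr]

theorem pvA_rows_eq (wd : List (List Int)) :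
    pvARowsLoop wd.reverse (wd.length : Int) = pvRowsSpec wd := by
  induction wd with
  | nil => simp [pvARowsLoop, pvRowsSpec]
  | cons r rest ih =>
      have hlen : ((r :: rest).length : Int) = (rest.length : Int) + 1 := by
        simp
      rw [List.reverse_cons, pvARowsLoop_append, hlen]
      simp only [List.all_reverse]
      by_cases hall : rest.all pvRowEmpty = true
      · rw [if_pos hall]
        have hz : pvRowsSpec rest = 0 := (pvRowsSpec_zero_iff rest).mpr hall
        simp only [pvRowsSpec, hz]
        rw [if_neg (by omega)]
        have he1 : (rest.length : Int) + 1 - (rest.reverse.length : Int) = 1 := by simp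
        rw [he1]
        by_cases hr : pvRowEmpty r = true
        · have hr' : (r.all fun idx => idx == -1) = true := hr
          simp only [pvARowsLoop]
          rw [if_pos hr']
          all_goals simp [hr]
        · have hr' : ¬ (r.all fun idx => idx == -1) = true := hr
          simp only [pvARowsLoop]
          rw [if_neg hr']
          all_goals simp [hr]
      · rw [if_neg hall]
        have hz : pvRowsSpec rest ≠ 0 := fun h => hall ((pvRowsSpec_zero_iff rest).mp h)
        have hpos : pvRowsSpec rest > 0 := by have := pvRowsSpec_nonneg rest; omega
        simp only [pvRowsSpec]
        rw [if_pos hpos]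
        rw [pvARowsLoop_shift rest.reverse ((rest.length : Int)) 1, ih]

theorem pvA_inner_eq (row : List Int) (s acc : Int) (ha : 0 ≤ acc) (hs : -1 ≤ s) :
    (PySem.List.enumerate row s).foldl (fun c p =>
        if p.2 ≠ -1 then max c (p.1 + 1) else c) acc = max acc (pvRowMax row s) := by
  induction row generalizing s acc with
  | nil => simp [PySem.List.enumerate_nil, pvRowMax]; omega
  | cons c rest ih =>
      rw [PySem.List.enumerate_cons]
      simp only [List.foldl_cons, pvRowMax]
      by_cases hc : c ≠ -1
      · rw [if_pos hc, if_pos hc, ih (s + 1) (max acc (s + 1)) (by omega) (by omega)]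
        omega
      · rw [if_neg hc, if_neg hc, ih (s + 1) acc ha (by omega)]

theorem pvA_cols_eq (wd : List (List Int)) (acc : Int) (ha : 0 ≤ acc) :
    wd.foldl (fun acc row =>
      (PySem.List.enumerate row).foldl (fun c p =>
        if p.2 ≠ -1 then max c (p.1 + 1) else c) acc) acc = max acc (pvColsSpec wd) := by
  induction wd generalizing acc with
  | nil => simp [pvColsSpec]; omega
  | cons r rest ih =>
      simp only [List.foldl_cons, pvColsSpec]
      rw [show (PySem.List.enumerate r) = (PySem.List.enumerate r 0) from rfl,
        pvA_inner_eq r 0 acc ha (by omega)]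
      rw [ih _ (by have := pvRowMax_nonneg r 0 (by omega); omega)]
      omega

-- ==== B side ====

theorem pvB_inner_eq (row : List Int) (s i lr mc : Int) (hmc : 0 ≤ mc) (hs : -1 ≤ s) :
    (PySem.List.enumerate row s).foldl (fun st q =>
        if q.2 ≠ -1 then (i, if q.1 + 1 > st.2 then q.1 + 1 else st.2) else st) (lr, mc) =
      (if pvRowEmpty row then lr else i, max mc (pvRowMax row s)) := by
  induction row generalizing s lr mc with
  | nil => simp [PySem.List.enumerate_nil, pvRowEmpty, pvRowMax]; omega
  | cons c rest ih =>
      rw [PySem.List.enumerate_cons]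
      simp only [List.foldl_cons, pvRowMax, pvRowEmpty, List.all_cons]
      by_cases hc : c ≠ -1
      · have hb : (c == -1) = false := by simpa using hc
        rw [if_pos hc, if_pos hc,
          ih (s + 1) (i) (if s + 1 > mc then s + 1 else mc) (by split_ifs <;> omega) (by omega)]
        simp only [hb, Bool.false_and, Bool.false_eq_true, if_false, ite_self, Prod.mk.injEq]
        exact ⟨trivial, by split_ifs <;> omega⟩
      · have hb : (c == -1) = true := by simpa using (not_not.mp hc)
        rw [if_neg hc, if_neg hc, ih (s + 1) lr mc hmc (by omega)]
        simp only [hb, Bool.true_and, pvRowEmpty]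
        rfl

theorem pvB_outer_eq (wd : List (List Int)) (s lr mc : Int) (hmc : 0 ≤ mc) (hs : -1 ≤ s) :
    (PySem.List.enumerate wd s).foldl (fun st p =>
      (PySem.List.enumerate p.2).foldl (fun st q =>
        if q.2 ≠ -1 then (p.1, if q.1 + 1 > st.2 then q.1 + 1 else st.2) else st) st) (lr, mc) =
      (if pvRowsSpec wd > 0 then s + pvRowsSpec wd - 1 else lr, max mc (pvColsSpec wd)) := by
  induction wd generalizing s lr mc with
  | nil => simp [PySem.List.enumerate_nil, pvRowsSpec, pvColsSpec]; omega
  | cons r rest ih =>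
      rw [PySem.List.enumerate_cons]
      simp only [List.foldl_cons]
      rw [show (PySem.List.enumerate r) = (PySem.List.enumerate r 0) from rfl,
        pvB_inner_eq r 0 s lr mc hmc (by omega)]
      rw [ih (s + 1) _ _ (by have := pvRowMax_nonneg r 0 (by omega); omega) (by omega)]
      have h0 := pvRowsSpec_nonneg rest
      have hcol : max (max mc (pvRowMax r 0)) (pvColsSpec rest) = max mc (pvColsSpec (r :: rest)) := by
        simp only [pvColsSpec]; omega
      simp only [pvRowsSpec, hcol]
      by_cases hpos : pvRowsSpec rest > 0
      · rw [if_pos hpos, if_pos hpos, if_pos (by omega)]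
        simp only [Prod.mk.injEq]
        exact ⟨by ring, trivial⟩
      · rw [if_neg hpos, if_neg hpos]
        by_cases hr : pvRowEmpty r = true
        · rw [if_pos hr, if_pos hr, if_neg (show ¬ (0:Int) > 0 by omega)]
        · rw [if_neg hr, if_neg hr, if_pos (show (1:Int) > 0 by omega)]
          simp only [Prod.mk.injEq]
          exact ⟨by ring, trivial⟩

-- ===== VERDICT (by name: the statement is the Claim_ definition above) =====
theorem get_grid_max_row_col_spec : Claim_equal_get_grid_max_row_col := by
  intro wd _
  unfold Spec_get_grid_max_row_col get_grid_max_row_col get_grid_max_row_col_alt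
  rw [show (PySem.List.enumerate wd) = (PySem.List.enumerate wd 0) from rfl,
    pvB_outer_eq wd 0 (-1) 0 (by omega) (by omega)]
  simp only
  rw [pvA_rows_eq wd, pvA_cols_eq wd 0 (by omega)]
  have h0 := pvRowsSpec_nonneg wd
  simp only [Prod.mk.injEq]
  exact ⟨by split_ifs <;> omega, trivial⟩
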